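-- pv_equiv track=rewrite | github.com/mace6728/COVID-19-anti-vaccine-tweets-classification | HW1_112550043.py | encode_text_to_ids
-- ===== SOURCE A (Python) =====
-- from typing import Any, Dict, Iterable, List, Literal, Mapping, Optional, Sequence, Tuple
--
-- PAD_INDEX = 0
--
-- UNK_INDEX = 1
--
-- def simple_tokenize(text: str) -> List[str]:
--     return text.strip().split()
--
-- def encode_text_to_ids(text: str, vocab: Dict[str, int], max_length: int) -> Tuple[List[int], List[int]]:
--     tokens = simple_tokenize(text)
--     token_ids = [vocab.get(tok, UNK_INDEX) for tok in tokens][:max_length]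
--     attention_mask = [1] * len(token_ids)
--
--     pad_len = max_length - len(token_ids)
--     if pad_len > 0:
--         token_ids.extend([PAD_INDEX] * pad_len)
--         attention_mask.extend([0] * pad_len)
--
--     return token_ids, attention_mask
-- ===== SOURCE B (Python) =====
-- PAD_INDEX = 0
-- UNK_INDEX = 1
--
-- def simple_tokenize(text):
--     return text.strip().split()
--
-- def encode_text_to_ids(text, vocab, max_length):
--     tokens = simple_tokenize(text)
--     token_ids = []
--     attention_mask = []
--     for i in range(max_length):
--         if i < len(tokens):
--             token_ids.append(vocab.get(tokens[i], UNK_INDEX))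
--             attention_mask.append(1)
--         else:
--             token_ids.append(PAD_INDEX)
--             attention_mask.append(0)
--     return token_ids, attention_mask
-- ===== Notes on version B (the rewrite author's own statement) =====
-- stated objective: alternative
-- what changed: Replaces A's slice-then-conditionally-extend (build full id list, truncate, compute pad_len, extend both lists) with a single fixed-length forward loop over range(max_length) that builds token_ids and attention_mask together position by position. Pre_ excludes negative max_length, a corner no caller would specify, where A's negative slice truncates from the end without padding while the fixed-length loop returns empty lists.
-- outside the precondition, e.g. on encode_text_to_ids('a b c', {}, -1): A returns ([1, 1], [1, 1]), B returns ([], [])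
import Mathlib
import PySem

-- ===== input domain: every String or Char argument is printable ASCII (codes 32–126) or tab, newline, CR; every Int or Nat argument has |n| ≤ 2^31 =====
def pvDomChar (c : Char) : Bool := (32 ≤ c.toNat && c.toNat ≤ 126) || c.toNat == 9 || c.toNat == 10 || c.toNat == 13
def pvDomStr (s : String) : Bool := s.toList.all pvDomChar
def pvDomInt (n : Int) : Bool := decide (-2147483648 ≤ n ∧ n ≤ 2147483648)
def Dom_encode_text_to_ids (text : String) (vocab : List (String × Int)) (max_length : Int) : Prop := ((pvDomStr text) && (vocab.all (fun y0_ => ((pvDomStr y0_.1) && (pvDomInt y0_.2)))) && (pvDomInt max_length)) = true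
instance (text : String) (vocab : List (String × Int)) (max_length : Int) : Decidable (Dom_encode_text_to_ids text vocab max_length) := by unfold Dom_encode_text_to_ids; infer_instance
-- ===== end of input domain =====

-- B builds token_ids and attention_mask together in one fixed-length loop over range(max_length)
-- instead of A's slice-then-conditionally-extend; objective: alternative decomposition, same cost.

-- ===== PORT A =====
-- tokens = text.strip().split()
def simple_tokenize (text : String) : List String :=
  PySem.Str.split₀ (PySem.Str.strip text)

def encode_text_to_ids (text : String) (vocab : List (String × Int)) (max_length : Int) : List Int × List Int :=
  let tokens := simple_tokenize text
  let token_ids := PySem.List.slice (tokens.map (fun tok => PySem.Dict.getD (PySem.Dict.mk vocab) tok 1)) none (some max_length)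
  let attention_mask := List.replicate token_ids.length (1 : Int)
  let pad_len := max_length - token_ids.length
  if pad_len > 0 then
    (token_ids ++ List.replicate pad_len.toNat (0 : Int),
     attention_mask ++ List.replicate pad_len.toNat (0 : Int))
  else
    (token_ids, attention_mask)

-- ===== PORT B =====
def encode_text_to_ids_alt (text : String) (vocab : List (String × Int)) (max_length : Int) : List Int × List Int :=
  let tokens := simple_tokenize text
  (PySem.List.pyRange 0 max_length 1).foldl
    (fun (acc : List Int × List Int) i =>
      if i < (tokens.length : Int) then
        (acc.1 ++ [PySem.Dict.getD (PySem.Dict.mk vocab) (PySem.List.pyGetD tokens i "") 1], acc.2 ++ [1])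
      else
        (acc.1 ++ [0], acc.2 ++ [0]))
    ([], [])

-- Pre_ excludes negative max_length on texts with more than |max_length| tokens, a corner no caller
-- would specify: there A's negative slice truncates from the end without padding while the natural
-- fixed-length loop returns empty lists — both behaviours are equally defensible.
def Pre_encode_text_to_ids (text : String) (vocab : List (String × Int)) (max_length : Int) : Prop :=
  0 ≤ max_length ∨ ((PySem.Str.split₀ (PySem.Str.strip text)).length : Int) + max_length ≤ 0
instance (text : String) (vocab : List (String × Int)) (max_length : Int) : Decidable (Pre_encode_text_to_ids text vocab max_length) := by unfold Pre_encode_text_to_ids; infer_instance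

def pvWitness_encode_text_to_ids : String × (List (String × Int)) × Int := ("a b", [("a", 5)], 3)

-- ===== PRECONDITION & SPEC =====
def Spec_encode_text_to_ids (text : String) (vocab : List (String × Int)) (max_length : Int) (out : List Int × List Int) : Prop := out = encode_text_to_ids_alt text vocab max_length
instance (text : String) (vocab : List (String × Int)) (max_length : Int) (out : List Int × List Int) : Decidable (Spec_encode_text_to_ids text vocab max_length out) := by unfold Spec_encode_text_to_ids; infer_instance

-- ===== CLAIM (what is proved, stated in full; the proofs are below) =====
def Claim_equal_encode_text_to_ids : Prop := ∀ (text : String) (vocab : List (String × Int)) (max_length : Int), Dom_encode_text_to_ids text vocab max_length → Pre_encode_text_to_ids text vocab max_length → Spec_encode_text_to_ids text vocab max_length (encode_text_to_ids text vocab max_length)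

-- ===== LEMMAS AND PROOFS =====

-- B's loop over range(0, n) computes: the first n mapped tokens, padded with 0s, and the matching mask.
theorem alt_loop_eq (tokens : List String) (g : String → Int) (n : Nat) :
    (PySem.List.pyRange 0 (n : Int) 1).foldl
      (fun (acc : List Int × List Int) i =>
        if i < (tokens.length : Int) then
          (acc.1 ++ [g (PySem.List.pyGetD tokens i "")], acc.2 ++ [1])
        else
          (acc.1 ++ [0], acc.2 ++ [0]))
      ([], [])
    = ((tokens.map g).take n ++ List.replicate (n - tokens.length) 0,
       List.replicate (min n tokens.length) (1 : Int) ++ List.replicate (n - tokens.length) 0) := by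
  induction n with
  | zero => simp
  | succ n ih =>
    have hc : ((n + 1 : Nat) : Int) = (n : Int) + 1 := by push_cast; ring
    rw [hc, PySem.List.pyRange_one_succ_right (by positivity), List.foldl_append, ih]
    simp only [List.foldl_cons, List.foldl_nil]
    by_cases h : n < tokens.length
    · have hlt : (n : Int) < (tokens.length : Int) := by exact_mod_cast h
      rw [if_pos hlt]
      have hget : PySem.List.pyGetD tokens ((n : Int)) "" = tokens[n] := by
        simp [PySem.List.pyGetD_natCast, List.getD_eq_getElem?_getD, h]
      have htake : (tokens.map g).take (n + 1) = (tokens.map g).take n ++ [g tokens[n]] := by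
        rw [List.take_add_one]
        simp [h]
      have h1 : n + 1 - tokens.length = 0 := by omega
      have h2 : n - tokens.length = 0 := by omega
      have h3 : min (n + 1) tokens.length = min n tokens.length + 1 := by omega
      simp [hget, htake, h1, h2, h3, List.replicate_succ']
    · have hlt : ¬ ((n : Int) < (tokens.length : Int)) := by
        simpa using (by omega : ¬ n < tokens.length)
      rw [if_neg hlt]
      have hlen : (tokens.map g).length ≤ n := by simp; omega
      have htake : (tokens.map g).take (n + 1) = (tokens.map g).take n := by
        simp [List.take_add_one, List.getElem?_eq_none hlen]
      have h1 : n + 1 - tokens.length = (n - tokens.length) + 1 := by omega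
      have h3 : min (n + 1) tokens.length = min n tokens.length := by omega
      simp [htake, h1, h3, List.replicate_succ', List.append_assoc]

-- ===== VERDICT (by name: the statement is the Claim_ definition above) =====
theorem encode_text_to_ids_spec : Claim_equal_encode_text_to_ids := by
  intro text vocab m _ hpre
  unfold Pre_encode_text_to_ids at hpre
  unfold Spec_encode_text_to_ids encode_text_to_ids encode_text_to_ids_alt
  rcases lt_or_ge m 0 with hneg | hnn
  · -- both sides are ([], []): the range is empty and the slice keeps no token
    have hlen : ((PySem.Str.split₀ (PySem.Str.strip text)).length : Int) + m ≤ 0 := by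
      rcases hpre with h | h
      · omega
      · exact h
    rw [PySem.List.pyRange_one_eq_nil (by omega)]
    have hk : m = -(((-m).toNat : Nat) : Int) := by omega
    rw [hk]
    have h0 : (List.map (fun tok => PySem.Dict.getD (PySem.Dict.mk vocab) tok 1)
        (PySem.Str.split₀ (PySem.Str.strip text))).length - (-m).toNat = 0 := by
      simp only [List.length_map]; omega
    simp only [PySem.List.slice_to_neg_natCast _ _ (by omega : 0 < (-m).toNat),
      simple_tokenize, List.foldl_nil, h0, List.take_zero]
    simp
  have hm : m = ((m.toNat : Nat) : Int) := by omega
  rw [hm, alt_loop_eq (simple_tokenize text) (fun tok => PySem.Dict.getD (PySem.Dict.mk vocab) tok 1) m.toNat]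
  simp only [PySem.List.slice_to_natCast]
  set tokens := simple_tokenize text
  set L := tokens.map (fun tok => PySem.Dict.getD (PySem.Dict.mk vocab) tok 1) with hL
  set n := m.toNat
  have hlen : (L.take n).length = min n L.length := by simp
  have hLlen : L.length = tokens.length := by simp [hL]
  split_ifs with h
  · have hpos : ((n : Int) - ((L.take n).length : Int)).toNat = n - tokens.length := by
      rw [hlen]; omega
    rw [hpos, hlen, hLlen]
  · have hle : n ≤ tokens.length := by
      rw [hlen, hLlen] at h; omega
    have h0 : n - tokens.length = 0 := by omega
    have hmin : min n tokens.length = n := by omega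
    rw [h0, hmin, hlen, hLlen, hmin]
    simp
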